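-- pv_equiv track=rewrite | github.com/johnnythoFF/FF-Player-APP | PlayerREPORT.py | parse_zone_counts
-- ===== SOURCE A (Python) =====
-- from collections import defaultdict
--
-- def parse_zone_counts(zone_list, zone_defs):
--     counts = defaultdict(int)
--     for entry in zone_list:
--         for part in str(entry).split(','):
--             part = part.strip()
--             for zone in zone_defs.keys():
--                 if zone.lower() == part.lower():
--                     counts[zone] += 1
--     return dict(counts)
-- ===== SOURCE B (Python) =====
-- def parse_zone_counts(zone_list, zone_defs):
--     # Stage 1: one pass over the entries, counting lowercased stripped part texts.
--     part_counts = {}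
--     for entry in zone_list:
--         for part in str(entry).split(','):
--             key = part.strip().lower()
--             part_counts[key] = part_counts.get(key, 0) + 1
--     # Stage 2: expand each counted part text to the zone keys whose lowering matches it.
--     result = {}
--     for key, n in part_counts.items():
--         for zone in zone_defs.keys():
--             if zone.lower() == key:
--                 result[zone] = n
--     return result
-- ===== Notes on version B (the rewrite author's own statement) =====
-- stated objective: alternative
-- what changed: B is a staged pipeline: one pass over the entries builds a counter keyed by the lowercased stripped part text, then a separate pass expands each counted part text to the matching zone keys of zone_defs, replacing A's triple-nested loop that scans every zone key for every CSV part and increments per match.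
import Mathlib
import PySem

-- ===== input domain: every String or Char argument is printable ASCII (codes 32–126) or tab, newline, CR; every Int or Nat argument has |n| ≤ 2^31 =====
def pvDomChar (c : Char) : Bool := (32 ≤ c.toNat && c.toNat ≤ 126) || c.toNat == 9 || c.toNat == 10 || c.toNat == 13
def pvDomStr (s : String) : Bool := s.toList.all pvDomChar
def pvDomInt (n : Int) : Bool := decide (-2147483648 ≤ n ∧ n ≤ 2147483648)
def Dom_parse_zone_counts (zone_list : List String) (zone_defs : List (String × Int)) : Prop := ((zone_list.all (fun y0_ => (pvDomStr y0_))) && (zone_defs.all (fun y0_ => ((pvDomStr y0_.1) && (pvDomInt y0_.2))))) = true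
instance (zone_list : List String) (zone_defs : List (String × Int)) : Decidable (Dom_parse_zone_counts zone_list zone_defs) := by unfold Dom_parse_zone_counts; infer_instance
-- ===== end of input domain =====

-- B is a staged pipeline (count the lowercased stripped part texts once, then expand each counted
-- text to the matching zone keys) instead of A's per-part scan over every zone key; same return value.

-- ===== PORT A =====
-- counts = defaultdict(int); for entry …: for part in str(entry).split(','): part = part.strip();
--   for zone in zone_defs.keys(): if zone.lower() == part.lower(): counts[zone] += 1; return dict(counts)
def parse_zone_counts (zone_list : List String) (zone_defs : List (String × Int)) : List (String × Int) :=
  let zd : PySem.Dict String Int := PySem.Dict.ofList zone_defs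
  let counts : PySem.Dict String Int :=
    zone_list.foldl (fun counts entry =>
      ((PySem.Str.split? entry ",").getD []).foldl (fun counts part0 =>   -- sep "," ≠ "": split? is always some
        let part := PySem.Str.strip part0
        zd.keys.foldl (fun counts zone =>
          if PySem.Str.lower zone == PySem.Str.lower part
          then counts.modify zone 0 (· + 1)   -- defaultdict(int): counts[zone] += 1
          else counts) counts) counts) PySem.Dict.empty
  counts.items

-- ===== PORT B =====
-- Stage 1: part_counts[part.strip().lower()] += 1 over all CSV parts of all entries.
-- Stage 2: for (key, n) in part_counts.items(): for zone in zone_defs.keys():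
--   if zone.lower() == key: result[zone] = n; return result
def parse_zone_counts_alt (zone_list : List String) (zone_defs : List (String × Int)) : List (String × Int) :=
  let part_counts : PySem.Dict String Int :=
    zone_list.foldl (fun d entry =>
      ((PySem.Str.split? entry ",").getD []).foldl (fun d part =>
        let key := PySem.Str.lower (PySem.Str.strip part)
        d.insert key (d.getD key 0 + 1)) d) PySem.Dict.empty
  let result : PySem.Dict String Int :=
    part_counts.items.foldl (fun r p =>
      (PySem.Dict.ofList zone_defs).keys.foldl (fun r zone =>
        if PySem.Str.lower zone == p.1 then r.insert zone p.2 else r) r) PySem.Dict.empty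
  result.items

-- ===== PRECONDITION & SPEC =====
def Spec_parse_zone_counts (zone_list : List String) (zone_defs : List (String × Int)) (out : List (String × Int)) : Prop := out = parse_zone_counts_alt zone_list zone_defs
instance (zone_list : List String) (zone_defs : List (String × Int)) (out : List (String × Int)) : Decidable (Spec_parse_zone_counts zone_list zone_defs out) := by unfold Spec_parse_zone_counts; infer_instance

-- ===== CLAIM (what is proved, stated in full; the proofs are below) =====
def Claim_equal_parse_zone_counts : Prop := ∀ (zone_list : List String) (zone_defs : List (String × Int)), Dom_parse_zone_counts zone_list zone_defs → Spec_parse_zone_counts zone_list zone_defs (parse_zone_counts zone_list zone_defs)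

-- ===== LEMMAS AND PROOFS =====

-- the lowered stripped text of one CSV part
def pzKey (part : String) : String := PySem.Str.lower (PySem.Str.strip part)
-- all lowered stripped parts of all entries, in order
def pzParts (zone_list : List String) : List String :=
  zone_list.flatMap (fun e => ((PySem.Str.split? e ",").getD []).map pzKey)
-- the zone keys whose lowering is l, in zone_defs order
def pzGroup (ks : List String) (l : String) : List String :=
  ks.filter (fun z => PySem.Str.lower z == l)

theorem mem_pzGroup {ks : List String} {l z : String} (h : z ∈ pzGroup ks l) :
    z ∈ ks ∧ PySem.Str.lower z = l := by
  have := List.mem_filter.mp h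
  exact ⟨this.1, by simpa using this.2⟩

-- A's dict is the counter of the flattened part → matching-zones expansion
theorem A_norm (zone_list : List String) (zone_defs : List (String × Int)) :
    parse_zone_counts zone_list zone_defs
      = (PySem.Dict.counter ((pzParts zone_list).flatMap
          (pzGroup (PySem.Dict.ofList zone_defs).keys))).items := by
  unfold parse_zone_counts
  rw [PySem.Dict.counter_eq_foldl, List.foldl_flatMap, pzParts, List.foldl_flatMap]
  simp only [List.foldl_map, pzGroup, List.foldl_filter, pzKey]
  rfl

-- deduplicating the flattened expansion = expanding the deduplicated parts
theorem ofList_flatMap_group (ks : List String) (hks : ks.Nodup) (ps : List String) :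
    PySem.Set.ofList (ps.flatMap (pzGroup ks)) = (PySem.Set.ofList ps).flatMap (pzGroup ks) := by
  induction ps using List.reverseRecOn with
  | nil => rfl
  | append_singleton t p ih =>
    rw [List.flatMap_append, PySem.Set.ofList_append, ih, PySem.Set.ofList_append_singleton,
        List.flatMap_singleton]
    by_cases hp : p ∈ PySem.Set.ofList t
    · rw [PySem.Set.add_of_mem hp, PySem.Set.update_eq_append_filter]
      have hnil : List.filter (fun y => !PySem.Set.contains ((PySem.Set.ofList t).flatMap (pzGroup ks)) y)
          (PySem.Set.ofList (pzGroup ks p)) = [] := by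
        rw [List.filter_eq_nil_iff]
        intro y hy
        have hy' : y ∈ pzGroup ks p := (PySem.Set.mem_ofList _ _).mp hy
        simp
        exact ⟨p, (PySem.Set.mem_ofList _ _).mp hp, hy'⟩
      rw [hnil, List.append_nil]
    · rw [PySem.Set.add_of_not_mem hp, List.flatMap_append, List.flatMap_singleton]
      refine PySem.Set.update_eq_append_of_disjoint _ _ (List.Nodup.filter _ hks) ?_
      intro x hx hmem
      obtain ⟨l, hl, hxl⟩ := List.mem_flatMap.mp hmem
      have h1 := (mem_pzGroup hxl).2
      have h2 := (mem_pzGroup hx).2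
      have hpl : p = l := h2.symm.trans h1
      rw [hpl] at hp
      exact hp hl

-- a zone in the group of l is hit once per part whose lowered text is l
theorem count_flatMap_group (ks : List String) (hks : ks.Nodup) (ps : List String)
    {l z : String} (hz : z ∈ pzGroup ks l) :
    (ps.flatMap (pzGroup ks)).count z = ps.count l := by
  induction ps with
  | nil => rfl
  | cons p t ih =>
    rw [List.flatMap_cons, List.count_append, ih, List.count_cons]
    by_cases hpl : p = l
    · subst hpl
      rw [List.count_eq_one_of_mem (show (pzGroup ks p).Nodup from List.Nodup.filter _ hks) hz]
      simp [Nat.add_comm]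
    · have hzn : z ∉ pzGroup ks p := fun hmem => hpl ((mem_pzGroup hmem).2.symm.trans (mem_pzGroup hz).2)
      rw [List.count_eq_zero.mpr hzn]
      simp [hpl]

-- B's stage 2 fold over any items list with pairwise-disjoint expansions appends fresh entries
theorem stage2 (ks : List String) (L : List (String × Int))
    (hL : (L.flatMap (fun p => pzGroup ks p.1)).Nodup) :
    (L.foldl (fun r p => ks.foldl (fun r z =>
        if PySem.Str.lower z == p.1 then r.insert z p.2 else r) r)
      (PySem.Dict.empty : PySem.Dict String Int)).items
      = L.flatMap (fun p => (pzGroup ks p.1).map (fun z => (z, p.2))) := by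
  have h2 : ∀ (r : PySem.Dict String Int) (p : String × Int),
      ks.foldl (fun r z => if PySem.Str.lower z == p.1 then r.insert z p.2 else r) r
        = ((pzGroup ks p.1).map (fun z => (z, p.2))).foldl (fun r q => r.insert q.1 q.2) r := by
    intro r p
    rw [List.foldl_map, pzGroup, List.foldl_filter]
  have hmf : List.map Prod.fst (List.flatMap (fun p => List.map (fun z => (z, p.2)) (pzGroup ks p.1)) L)
      = List.flatMap (fun p => pzGroup ks p.1) L := by
    rw [List.map_flatMap]
    refine List.flatMap_congr ?_
    intro p _
    rw [List.map_map]
    exact List.map_id'' (fun z => rfl) _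
  simp only [h2]
  rw [← List.foldl_flatMap]
  rw [PySem.Dict.items_foldl_insert_fresh _ Prod.fst Prod.snd _
        (fun a _ => PySem.Dict.contains_empty _)
        (by rw [hmf]; exact hL)]
  rw [show (PySem.Dict.empty : PySem.Dict String Int).items = [] from rfl, List.nil_append]
  exact List.map_id'' (fun a => rfl) _

-- B's result dict items, in closed form
theorem B_norm (zone_list : List String) (zone_defs : List (String × Int)) :
    parse_zone_counts_alt zone_list zone_defs
      = (PySem.Set.ofList (pzParts zone_list)).flatMap (fun l =>
          (pzGroup (PySem.Dict.ofList zone_defs).keys l).map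
            (fun z => (z, ((pzParts zone_list).count l : Int)))) := by
  have hks : ((PySem.Dict.ofList zone_defs : PySem.Dict String Int)).keys.Nodup :=
    PySem.Dict.nodup_keys_ofList zone_defs
  have h1 : (zone_list.foldl (fun d entry =>
      ((PySem.Str.split? entry ",").getD []).foldl (fun d part =>
        let key := PySem.Str.lower (PySem.Str.strip part)
        d.insert key (d.getD key 0 + 1)) d) PySem.Dict.empty)
      = PySem.Dict.counter (pzParts zone_list) := by
    rw [← PySem.Dict.foldl_insert_getD_add_one_eq_counter, pzParts, List.foldl_flatMap]
    simp only [List.foldl_map, pzKey]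
  have hL : ((PySem.Dict.counter (pzParts zone_list)).items.flatMap
      (fun p => pzGroup (PySem.Dict.ofList zone_defs).keys p.1)).Nodup := by
    rw [PySem.Dict.items_counter, List.flatMap_map,
        ← ofList_flatMap_group _ hks]
    exact PySem.Set.nodup_ofList _
  simp only [parse_zone_counts_alt]
  rw [h1, stage2 _ _ hL, PySem.Dict.items_counter, List.flatMap_map]

-- ===== VERDICT (by name: the statement is the Claim_ definition above) =====
theorem parse_zone_counts_spec : Claim_equal_parse_zone_counts := by
  intro zone_list zone_defs _
  unfold Spec_parse_zone_counts
  have hks : (PySem.Dict.ofList zone_defs).keys.Nodup := PySem.Dict.nodup_keys_ofList zone_defs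
  rw [A_norm, B_norm, PySem.Dict.items_counter,
      ofList_flatMap_group _ hks, List.map_flatMap]
  refine List.flatMap_congr ?_
  intro l hl
  refine List.map_congr_left ?_
  intro z hz
  rw [count_flatMap_group _ hks _ hz]
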